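-- pv_equiv track=rewrite | github.com/Meenakshi-4235/Phase1-Tasks | Task1d.py | remove_common_chars
-- ===== SOURCE A (Python) =====
-- def remove_common_chars(name1, name2):
--     name1_list = list(name1)
--     name2_list = list(name2)
--
--     for char in name1:
--         if char in name2_list:
--             name1_list.remove(char)
--             name2_list.remove(char)
--
--     return ''.join(name1_list), ''.join(name2_list)
-- ===== SOURCE B (Python) =====
-- def remove_common_chars(name1, name2):
--     counts1 = {}
--     for c in name1:
--         counts1[c] = counts1.get(c, 0) + 1
--     counts2 = {}
--     for c in name2:
--         counts2[c] = counts2.get(c, 0) + 1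
--
--     def rebuild(s, own, other):
--         out = []
--         skipped = {}
--         for c in s:
--             k = skipped.get(c, 0)
--             if k < min(own.get(c, 0), other.get(c, 0)):
--                 skipped[c] = k + 1
--             else:
--                 out.append(c)
--         return ''.join(out)
--
--     return rebuild(name1, counts1, counts2), rebuild(name2, counts2, counts1)
-- ===== Notes on version B (the rewrite author's own statement) =====
-- stated objective: faster
-- what changed: Replaced the quadratic loop of repeated list membership tests and list.remove calls by two character-count dictionaries built in one pass, with each output string rebuilt in a single pass that skips the first min(count1,count2) occurrences of every character.
import Mathlib
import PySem

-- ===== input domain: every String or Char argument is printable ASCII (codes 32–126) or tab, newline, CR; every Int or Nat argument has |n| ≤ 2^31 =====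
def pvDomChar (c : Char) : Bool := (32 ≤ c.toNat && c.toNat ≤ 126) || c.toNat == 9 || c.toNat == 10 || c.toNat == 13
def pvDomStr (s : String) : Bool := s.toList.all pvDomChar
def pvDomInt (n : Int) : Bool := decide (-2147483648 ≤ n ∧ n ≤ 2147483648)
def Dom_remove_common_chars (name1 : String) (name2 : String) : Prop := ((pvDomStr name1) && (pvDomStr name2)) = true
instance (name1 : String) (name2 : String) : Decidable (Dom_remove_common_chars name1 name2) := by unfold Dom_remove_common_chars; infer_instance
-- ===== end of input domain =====

-- B replaces A's quadratic remove/membership loop by one-pass character counters and a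
-- single skipping rebuild pass per string (objective: faster).
-- Python A returns a tuple (s, t); under the task's signature it is ported as the list [s, t].

-- ===== PORT A =====
-- A's loop over name1, carrying the two mutating lists (name1_list, name2_list) as state.
-- Python's list.remove raises on a missing element; for name2_list it is guarded by the
-- membership test, and for name1_list the element is always present (each occurrence of a
-- char in name1 removes at most its own copy), so the `.getD` fallback is never reached.
def pvLoopA (cs : List Char) (st : List Char × List Char) : List Char × List Char :=
  match cs with
  | [] => st
  | c :: t =>
    if c ∈ st.2 then
      pvLoopA t ((PySem.List.remove? st.1 c).getD st.1, (PySem.List.remove? st.2 c).getD st.2)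
    else
      pvLoopA t st

def remove_common_chars (name1 : String) (name2 : String) : List String :=
  [String.ofList (pvLoopA name1.toList (name1.toList, name2.toList)).1,
   String.ofList (pvLoopA name1.toList (name1.toList, name2.toList)).2]

-- ===== PORT B =====
-- counts[c] = counts.get(c, 0) + 1 loop
def pvCountB (s : List Char) : PySem.Dict Char Int :=
  s.foldl (fun d c => d.insert c (d.getD c 0 + 1)) PySem.Dict.empty

-- rebuild(s, own, other): skip an occurrence of c while fewer than min(own[c], other[c]) skipped
def pvRebuildB (s : List Char) (own other : PySem.Dict Char Int) : List Char :=
  (s.foldl (fun (st : List Char × PySem.Dict Char Int) c =>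
      let k := st.2.getD c 0
      if k < min (own.getD c 0) (other.getD c 0) then
        (st.1, st.2.insert c (k + 1))
      else
        (st.1 ++ [c], st.2)) ([], PySem.Dict.empty)).1

def remove_common_chars_alt (name1 : String) (name2 : String) : List String :=
  [String.ofList (pvRebuildB name1.toList (pvCountB name1.toList) (pvCountB name2.toList)),
   String.ofList (pvRebuildB name2.toList (pvCountB name2.toList) (pvCountB name1.toList))]

-- ===== PRECONDITION & SPEC =====
def Spec_remove_common_chars (name1 : String) (name2 : String) (out : List String) : Prop := out = remove_common_chars_alt name1 name2
instance (name1 : String) (name2 : String) (out : List String) : Decidable (Spec_remove_common_chars name1 name2 out) := by unfold Spec_remove_common_chars; infer_instance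

-- ===== CLAIM (what is proved, stated in full; the proofs are below) =====
def Claim_equal_remove_common_chars : Prop := ∀ (name1 : String) (name2 : String), Dom_remove_common_chars name1 name2 → Spec_remove_common_chars name1 name2 (remove_common_chars name1 name2)

-- ===== LEMMAS AND PROOFS =====

-- Decrement a skip budget at one character.
def pvDec (k : Char → Nat) (c : Char) : Char → Nat := fun d => if d = c then k d - 1 else k d

theorem pvDec_self (k : Char → Nat) (c : Char) : pvDec k c c = k c - 1 := by
  simp [pvDec]

theorem pvDec_ne (k : Char → Nat) {c d : Char} (h : d ≠ c) : pvDec k c d = k d := by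
  simp [pvDec, h]

theorem pvDec_comm (k : Char → Nat) {c d : Char} (h : d ≠ c) :
    pvDec (pvDec k d) c = pvDec (pvDec k c) d := by
  funext e
  by_cases hec : e = c <;> by_cases hed : e = d <;> simp_all [pvDec]

-- Common characterisation: drop, for each char c, the first k c occurrences of c.
def pvDropSkip (l : List Char) (k : Char → Nat) : List Char :=
  match l with
  | [] => []
  | c :: t => if 0 < k c then pvDropSkip t (pvDec k c) else c :: pvDropSkip t k

theorem pvDropSkip_zero (l : List Char) (k : Char → Nat) (h : ∀ c, k c = 0) :
    pvDropSkip l k = l := by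
  induction l with
  | nil => rfl
  | cons c t ih => simp [pvDropSkip, h c, ih]

theorem pvDropSkip_erase (l : List Char) (k : Char → Nat) (c : Char) (h : 1 ≤ k c) :
    pvDropSkip l k = pvDropSkip (l.erase c) (pvDec k c) := by
  induction l generalizing k with
  | nil => rfl
  | cons d t ih =>
    by_cases hdc : d = c
    · subst hdc
      rw [List.erase_cons_head]
      simp only [pvDropSkip, if_pos (show 0 < k d from h)]
    · have herase : (d :: t).erase c = d :: t.erase c := by simp [hdc]
      rw [herase]
      by_cases hkd : 0 < k d
      · have hkd' : 0 < pvDec k c d := by rw [pvDec_ne _ hdc]; exact hkd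
        simp only [pvDropSkip, if_pos hkd, if_pos hkd']
        have h' : 1 ≤ pvDec k d c := by
          rw [pvDec_ne _ (Ne.symm hdc)]; exact h
        rw [ih (pvDec k d) h', pvDec_comm _ (Ne.symm hdc)]
      · have hkd' : ¬ 0 < pvDec k c d := by rw [pvDec_ne _ hdc]; exact hkd
        simp only [pvDropSkip, if_neg hkd, if_neg hkd']
        exact congrArg (d :: ·) (ih k h)

theorem pv_remove_getD_eq_erase (l : List Char) (c : Char) :
    (PySem.List.remove? l c).getD l = l.erase c := by
  by_cases h : c ∈ l
  · rw [PySem.List.remove?_eq_some_erase l c h]; rfl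
  · rw [(PySem.List.remove?_eq_none_iff l c).mpr h]
    simp [List.erase_of_not_mem h]

-- A's loop computes pvDropSkip with budget min(remaining count in cs, count in current l2).
theorem pvLoopA_eq (cs : List Char) : ∀ (l1 l2 : List Char),
    pvLoopA cs (l1, l2)
      = (pvDropSkip l1 (fun c => min (List.count c cs) (List.count c l2)),
         pvDropSkip l2 (fun c => min (List.count c cs) (List.count c l2))) := by
  induction cs with
  | nil =>
    intro l1 l2
    simp [pvLoopA, pvDropSkip_zero]
  | cons c t ih =>
    intro l1 l2
    by_cases hc : c ∈ l2
    · have h2 : 1 ≤ List.count c l2 := List.one_le_count_iff.mpr hc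
      have hk : 1 ≤ min (List.count c (c :: t)) (List.count c l2) := by
        have h1 : 1 ≤ List.count c (c :: t) := by simp [List.count_cons_self]
        exact le_min h1 h2
      have step : pvLoopA (c :: t) (l1, l2) = pvLoopA t (l1.erase c, l2.erase c) := by
        simp only [pvLoopA, if_pos hc, pv_remove_getD_eq_erase]
      rw [step, ih]
      have hfun : (fun d => min (List.count d t) (List.count d (l2.erase c)))
          = pvDec (fun d => min (List.count d (c :: t)) (List.count d l2)) c := by
        funext d
        by_cases hdc : d = c
        · subst hdc
          rw [pvDec_self, List.count_erase_self, List.count_cons_self]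
          omega
        · rw [pvDec_ne _ hdc, List.count_erase_of_ne hdc]
          have : List.count d (c :: t) = List.count d t := by simp [Ne.symm hdc]
          rw [this]
      rw [hfun, ← pvDropSkip_erase l1 _ c hk, ← pvDropSkip_erase l2 _ c hk]
    · have h2 : List.count c l2 = 0 := List.count_eq_zero.mpr hc
      have step : pvLoopA (c :: t) (l1, l2) = pvLoopA t (l1, l2) := by
        simp [pvLoopA, hc]
      rw [step, ih]
      have hfun : (fun d => min (List.count d t) (List.count d l2))
          = (fun d => min (List.count d (c :: t)) (List.count d l2)) := by
        funext d
        by_cases hdc : d = c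
        · subst hdc; simp [h2]
        · have : List.count d (c :: t) = List.count d t := by simp [Ne.symm hdc]
          rw [this]
      rw [hfun]

-- B's rebuild loop computes pvDropSkip with remaining budget min(own[c], other[c]) - skipped[c].
theorem pvRebuildB_loop (own other : PySem.Dict Char Int) (l : List Char) :
    ∀ (out : List Char) (sk : PySem.Dict Char Int),
    (l.foldl (fun (st : List Char × PySem.Dict Char Int) c =>
        let k := st.2.getD c 0
        if k < min (own.getD c 0) (other.getD c 0) then
          (st.1, st.2.insert c (k + 1))
        else
          (st.1 ++ [c], st.2)) (out, sk)).1
      = out ++ pvDropSkip l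
          (fun c => (min (own.getD c 0) (other.getD c 0) - sk.getD c 0).toNat) := by
  induction l with
  | nil => intro out sk; simp [pvDropSkip]
  | cons c t ih =>
    intro out sk
    by_cases hlt : sk.getD c 0 < min (own.getD c 0) (other.getD c 0)
    · have hpos : 0 < (min (own.getD c 0) (other.getD c 0) - sk.getD c 0).toNat := by omega
      simp only [List.foldl_cons, if_pos hlt]
      rw [ih]
      have hfun : (fun d => (min (own.getD d 0) (other.getD d 0)
              - (sk.insert c (sk.getD c 0 + 1)).getD d 0).toNat)
          = pvDec (fun d => (min (own.getD d 0) (other.getD d 0) - sk.getD d 0).toNat) c := by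
        funext d
        by_cases hdc : d = c
        · subst hdc
          rw [pvDec_self, PySem.Dict.getD_insert_self]
          omega
        · rw [pvDec_ne _ hdc, PySem.Dict.getD_insert_of_ne sk _ _ hdc]
      rw [hfun]
      have hstep : pvDropSkip (c :: t)
          (fun d => (min (own.getD d 0) (other.getD d 0) - sk.getD d 0).toNat)
          = pvDropSkip t
              (pvDec (fun d => (min (own.getD d 0) (other.getD d 0) - sk.getD d 0).toNat) c) := by
        simp only [pvDropSkip, if_pos hpos]
      rw [hstep]
    · have hz : (min (own.getD c 0) (other.getD c 0) - sk.getD c 0).toNat = 0 := by omega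
      simp only [List.foldl_cons, if_neg hlt]
      rw [ih]
      have hstep : pvDropSkip (c :: t)
          (fun d => (min (own.getD d 0) (other.getD d 0) - sk.getD d 0).toNat)
          = c :: pvDropSkip t
              (fun d => (min (own.getD d 0) (other.getD d 0) - sk.getD d 0).toNat) := by
        simp only [pvDropSkip, hz, Nat.lt_irrefl, if_false]
      rw [hstep]
      simp [List.append_assoc]

theorem pvCountB_getD (s : List Char) (c : Char) :
    (pvCountB s).getD c 0 = (List.count c s : Int) := by
  unfold pvCountB
  rw [PySem.Dict.getD_foldl_insert_add_one]
  simp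

theorem pvRebuildB_eq (s1 s2 s : List Char) :
    pvRebuildB s (pvCountB s1) (pvCountB s2)
      = pvDropSkip s (fun c => min (List.count c s1) (List.count c s2)) := by
  unfold pvRebuildB
  rw [pvRebuildB_loop]
  have hfun : (fun c => (min ((pvCountB s1).getD c 0) ((pvCountB s2).getD c 0)
        - (PySem.Dict.empty : PySem.Dict Char Int).getD c 0).toNat)
      = (fun c => min (List.count c s1) (List.count c s2)) := by
    funext c
    rw [pvCountB_getD, pvCountB_getD, PySem.Dict.getD_empty]
    omega
  rw [hfun, List.nil_append]

-- ===== VERDICT (by name: the statement is the Claim_ definition above) =====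
theorem remove_common_chars_spec : Claim_equal_remove_common_chars := by
  intro name1 name2 _
  unfold Spec_remove_common_chars remove_common_chars remove_common_chars_alt
  rw [pvLoopA_eq, pvRebuildB_eq, pvRebuildB_eq]
  have hmin : (fun c => min (List.count c name2.toList) (List.count c name1.toList))
      = (fun c => min (List.count c name1.toList) (List.count c name2.toList)) := by
    funext c; exact Nat.min_comm _ _
  rw [hmin]
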